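-- pv_equiv track=rewrite | github.com/olsenw/LeetCodeExercises | Python3/grid_game.py | gridGame_tle
-- ===== SOURCE A (Python) =====
-- from typing import List, Dict, Set, Optional
--
-- def gridGame_tle(grid: List[List[int]]) -> int:
--     n = len(grid[0])
--     top = [0]
--     bottom = [0]
--     for i in range(n):
--         top.append(top[-1] + grid[0][i])
--         bottom.append(bottom[-1] + grid[1][n-1-i])
--     top = top[1:]
--     bottom = bottom[1:][::-1]
--     answer = float('inf')
--     for i in range(n):
--         a = 0
--         for j in range(n):
--             t = 0 if j <= i else top[j] - top[i]
--             b = 0 if i <= j else bottom[j] - bottom[i]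
--             a = max(a, t+b)
--         answer = min(answer, a)
--     return answer
-- ===== SOURCE B (Python) =====
-- from typing import List, Dict, Set, Optional
--
-- def gridGame_tle(grid: List[List[int]]) -> int:
--     # O(n): suffix-max of top prefix sums and running prefix-max of bottom suffix
--     # sums replace A's quadratic min-over-i / max-over-j double loop.
--     row0, row1 = grid[0], grid[1]
--     n = len(row0)
--     top = []                      # top[i] = row0[0] + ... + row0[i]
--     s = 0
--     for v in row0:
--         s += v
--         top.append(s)
--     bot_rev = []                  # suffix sums of row1[:n], built reversed
--     s = 0
--     for v in reversed(row1[:n]):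
--         s += v
--         bot_rev.append(s)
--     bot = bot_rev[::-1]           # bot[i] = row1[i] + ... + row1[n-1]
--     suf_rev = []                  # suffix maxima of top, built reversed
--     m = None
--     for t in reversed(top):
--         m = t if m is None else max(m, t)
--         suf_rev.append(m)
--     suf = suf_rev[::-1]           # suf[i] = max(top[i:])
--     best = None
--     pmax = None                   # max(bot[:i]) before iteration i
--     for i in range(n):
--         a = 0
--         if i + 1 < n:
--             a = max(a, suf[i + 1] - top[i])
--         if pmax is not None:
--             a = max(a, pmax - bot[i])
--         pmax = bot[i] if pmax is None else max(pmax, bot[i])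
--         best = a if best is None else min(best, a)
--     return best
-- ===== Notes on version B (the rewrite author's own statement) =====
-- stated objective: faster
-- what changed: Replaced A's O(n^2) min-over-i/max-over-j double loop by precomputed suffix maxima of the top prefix sums plus a running prefix maximum of the bottom suffix sums, giving the answer in one O(n) pass.
-- outside the precondition, e.g. on gridGame_tle([[], []]): A returns inf, B returns None
import Mathlib
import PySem

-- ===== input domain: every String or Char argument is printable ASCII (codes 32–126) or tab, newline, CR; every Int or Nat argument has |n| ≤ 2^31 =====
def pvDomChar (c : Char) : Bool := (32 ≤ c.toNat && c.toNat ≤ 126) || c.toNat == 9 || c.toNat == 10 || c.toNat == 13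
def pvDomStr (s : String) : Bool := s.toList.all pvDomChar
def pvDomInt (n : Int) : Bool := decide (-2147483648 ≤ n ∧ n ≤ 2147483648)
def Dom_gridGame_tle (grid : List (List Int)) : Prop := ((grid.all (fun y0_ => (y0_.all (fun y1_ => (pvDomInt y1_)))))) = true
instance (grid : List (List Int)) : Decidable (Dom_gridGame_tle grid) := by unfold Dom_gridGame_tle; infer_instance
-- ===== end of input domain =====

-- B replaces A's quadratic min-over-i/max-over-j double loop by suffix maxima of
-- the top prefix sums and a running prefix maximum of the bottom suffix sums (O(n)).

-- ===== PORT A =====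
-- A-side helper: answer = min(answer, a) where answer : Option Int models
-- float('inf') (none = inf; some after the first min)
def pyInfMin (answer : Option Int) (a : Int) : Option Int :=
  match answer with
  | none => some a              -- min(inf, a) = a
  | some v => some (min v a)

-- literal transliteration of A; indexing via pyGetD (in range under Pre_);
-- the final .getD 0 is unreachable under Pre_ (n ≥ 1).
def gridGame_tle (grid : List (List Int)) : Int :=
  let n : Int := (PySem.List.pyGetD grid 0 []).length
  let tb := (PySem.List.pyRange 0 n 1).foldl
    (fun (tb : List Int × List Int) i =>
      (tb.1 ++ [PySem.List.pyGetD tb.1 (-1) 0 + PySem.List.pyGetD (PySem.List.pyGetD grid 0 []) i 0],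
       tb.2 ++ [PySem.List.pyGetD tb.2 (-1) 0 + PySem.List.pyGetD (PySem.List.pyGetD grid 1 []) (n - 1 - i) 0]))
    ([0], [0])
  let top := PySem.List.slice tb.1 (some 1) none            -- top[1:]
  let bottom := (PySem.List.slice tb.2 (some 1) none).reverse  -- bottom[1:][::-1]
  let answer : Option Int := (PySem.List.pyRange 0 n 1).foldl
    (fun answer i =>
      let a : Int := (PySem.List.pyRange 0 n 1).foldl
        (fun a j =>
          let t : Int := if j ≤ i then 0 else PySem.List.pyGetD top j 0 - PySem.List.pyGetD top i 0
          let b : Int := if i ≤ j then 0 else PySem.List.pyGetD bottom j 0 - PySem.List.pyGetD bottom i 0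
          max a (t + b)) 0
      pyInfMin answer a) none
  answer.getD 0

-- ===== PORT B =====
-- B-side helpers: the None-handling conditional expressions of Source B
def pyMaxN (mo : Option Int) (t : Int) : Int :=    -- t if m is None else max(m, t)
  match mo with
  | none => t
  | some m0 => max m0 t

def pyRelax (a : Int) (pmax : Option Int) (bi : Int) : Int :=  -- if pmax is not None: a = max(a, pmax - bot[i])
  match pmax with
  | none => a
  | some p => max a (p - bi)

def pyMinN (best : Option Int) (a : Int) : Option Int :=  -- a if best is None else min(best, a)
  match best with
  | none => some a
  | some b => some (min b a)

-- literal transliteration of Source B; loops building lists by append become folds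
-- carrying (list so far, running value); None-initialised maxima are Option Int.
def gridGame_tle_alt (grid : List (List Int)) : Int :=
  let row0 := PySem.List.pyGetD grid 0 []
  let row1 := PySem.List.pyGetD grid 1 []
  let n : Int := row0.length
  let top := (row0.foldl (fun (p : List Int × Int) v => (p.1 ++ [p.2 + v], p.2 + v)) ([], 0)).1
  let botRev := (((PySem.List.slice row1 none (some n)).reverse).foldl
      (fun (p : List Int × Int) v => (p.1 ++ [p.2 + v], p.2 + v)) ([], 0)).1
  let bot := botRev.reverse
  let sufRev := (top.reverse.foldl
      (fun (p : List Int × Option Int) t =>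
        let m : Int := pyMaxN p.2 t
        (p.1 ++ [m], some m)) ([], none)).1
  let suf := sufRev.reverse
  let st := (PySem.List.pyRange 0 n 1).foldl
    (fun (st : Option Int × Option Int) i =>
      let a : Int := 0
      let a : Int := if i + 1 < n then max a (PySem.List.pyGetD suf (i + 1) 0 - PySem.List.pyGetD top i 0) else a
      let a : Int := pyRelax a st.2 (PySem.List.pyGetD bot i 0)
      let pmax' : Option Int := some (pyMaxN st.2 (PySem.List.pyGetD bot i 0))
      let best' : Option Int := pyMinN st.1 a
      (best', pmax')) (none, none)
  st.1.getD 0   -- unreachable default: under Pre_ (n ≥ 1) best is some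

-- ===== PRECONDITION & SPEC =====
-- Pre_ excludes inputs where A raises an IndexError (fewer than two rows, or the
-- second row shorter than the first) and the empty first row, on which A returns
-- float('inf') — a float, not a value of the declared int type.
def Pre_gridGame_tle (grid : List (List Int)) : Prop :=
  2 ≤ grid.length ∧ 1 ≤ (grid.getD 0 []).length ∧ (grid.getD 0 []).length ≤ (grid.getD 1 []).length
instance (grid : List (List Int)) : Decidable (Pre_gridGame_tle grid) := by
  unfold Pre_gridGame_tle; infer_instance

def pvWitness_gridGame_tle : List (List Int) := [[2, 5, 4], [1, 5, 1]]

def Spec_gridGame_tle (grid : List (List Int)) (out : Int) : Prop := out = gridGame_tle_alt grid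
instance (grid : List (List Int)) (out : Int) : Decidable (Spec_gridGame_tle grid out) := by
  unfold Spec_gridGame_tle; infer_instance

-- ===== CLAIM (what is proved, stated in full; the proofs are below) =====
def Claim_equal_gridGame_tle : Prop := ∀ (grid : List (List Int)), Dom_gridGame_tle grid → Pre_gridGame_tle grid → Spec_gridGame_tle grid (gridGame_tle grid)


-- ===== LEMMAS AND PROOFS =====

-- prefix sums of xs starting after accumulated value s
def prefS : List Int → Int → List Int
  | [], _ => []
  | v :: t, s => (s + v) :: prefS t (s + v)

-- maximum of a nonempty list (0 for [])
def maxOf : List Int → Int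
  | [] => 0
  | v :: t => t.foldl max v

-- running maxima (Python's None-initialised running max loop)
def runM : List Int → Option Int → List Int
  | [], _ => []
  | v :: t, mo => pyMaxN mo v :: runM t (some (pyMaxN mo v))

-- the common per-i value both inner computations reduce to
def refA (topL botL : List Int) (n i : Int) : Int :=
  if 0 < i then
    max (if i + 1 < n then
        max 0 (maxOf (topL.drop (i.toNat + 1)) - PySem.List.pyGetD topL i 0) else 0)
      (maxOf (botL.take i.toNat) - PySem.List.pyGetD botL i 0)
  else
    (if i + 1 < n then
        max 0 (maxOf (topL.drop (i.toNat + 1)) - PySem.List.pyGetD topL i 0) else 0)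

lemma pvMaxSwap (x y : Int) : max (max 0 x) y = max (max 0 y) x := by
  rw [max_assoc, max_comm x y, ← max_assoc]

lemma pvFoldlMaxInit (t : List Int) : ∀ v x : Int, t.foldl max (max v x) = max v (t.foldl max x) := by
  induction t with
  | nil => intro v x; rfl
  | cons w u ih =>
    intro v x
    simp only [List.foldl_cons, max_assoc]
    exact ih v (max x w)

lemma pvFoldlMaxSub (t : List Int) : ∀ v c d : Int,
    (v :: t).foldl (fun a x => max a (x - d)) c = max c (t.foldl max v - d) := by
  induction t with
  | nil => intro v c d; rfl
  | cons w u ih =>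
    intro v c d
    have h1 := ih w (max c (v - d)) d
    simp only [List.foldl_cons] at h1 ⊢
    rw [h1, pvFoldlMaxInit u v w, ← max_sub_sub_right, ← max_assoc]

lemma pvMaxOfCons (v : Int) (t : List Int) : maxOf (v :: t) = t.foldl max v := rfl

lemma pvMaxOfCons' (v : Int) (t : List Int) (ht : t ≠ []) :
    maxOf (v :: t) = max v (maxOf t) := by
  cases t with
  | nil => exact absurd rfl ht
  | cons w u => simp only [List.foldl_cons, maxOf]; exact pvFoldlMaxInit u v w

lemma pvMaxOfAppend (xs : List Int) (y : Int) (hxs : xs ≠ []) :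
    maxOf (xs ++ [y]) = max (maxOf xs) y := by
  induction xs with
  | nil => exact absurd rfl hxs
  | cons v t ih =>
    cases t with
    | nil => simp [maxOf]
    | cons w u =>
      have h := ih (by simp)
      rw [List.cons_append, pvMaxOfCons' v (((w :: u) : List Int) ++ [y]) (by simp), h,
        pvMaxOfCons' v (w :: u) (by simp), max_assoc]

lemma pvMaxOfReverse (xs : List Int) : maxOf xs.reverse = maxOf xs := by
  induction xs with
  | nil => rfl
  | cons v t ih =>
    cases t with
    | nil => rfl
    | cons w u =>
      rw [List.reverse_cons, pvMaxOfAppend _ v (by simp), ih,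
        pvMaxOfCons' v (w :: u) (by simp), max_comm]

lemma pvPrefSLength (xs : List Int) : ∀ s : Int, (prefS xs s).length = xs.length := by
  induction xs with
  | nil => intro s; rfl
  | cons v t ih => intro s; simp [prefS, ih]

lemma pvRunMLength (xs : List Int) : ∀ mo : Option Int, (runM xs mo).length = xs.length := by
  induction xs with
  | nil => intro mo; rfl
  | cons v t ih => intro mo; simp [runM, ih]

lemma pvRunMGetD (xs : List Int) : ∀ (mo : Option Int) (k : ℕ), k < xs.length →
    (runM xs mo).getD k 0 =
      (match mo with | none => maxOf (xs.take (k + 1)) | some m => max m (maxOf (xs.take (k + 1)))) := by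
  induction xs with
  | nil => intro mo k hk; simp at hk
  | cons v t ih =>
    intro mo k hk
    match k with
    | 0 =>
      cases mo <;> simp [runM, maxOf, pyMaxN]
    | k + 1 =>
      have hk' : k < t.length := by simpa using hk
      have htne : t.take (k + 1) ≠ [] := by
        cases t with
        | nil => simp at hk'
        | cons w u => simp
      have hstep : maxOf ((v :: t).take (k + 1 + 1)) = max v (maxOf (t.take (k + 1))) := by
        rw [List.take_succ_cons, pvMaxOfCons' v _ htne]
      cases mo with
      | none =>
        simp only [runM, pyMaxN, List.getD_cons_succ, ih (some v) k hk', hstep]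
      | some m0 =>
        simp only [runM, pyMaxN, List.getD_cons_succ, ih (some (max m0 v)) k hk', hstep, max_assoc]

lemma pvGetDReverse (l : List Int) (k : ℕ) (hk : k < l.length) :
    l.reverse.getD k 0 = l.getD (l.length - 1 - k) 0 := by
  rw [List.getD_eq_getElem _ _ (by simpa using hk), List.getD_eq_getElem _ _ (by omega),
    List.getElem_reverse]

lemma pvSufGetD (topL : List Int) (k : ℕ) (hk : k < topL.length) :
    ((runM topL.reverse none).reverse).getD k 0 = maxOf (topL.drop k) := by
  have hlen : (runM topL.reverse none).length = topL.length := by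
    rw [pvRunMLength, List.length_reverse]
  rw [pvGetDReverse _ k (by omega), hlen,
    pvRunMGetD _ none (topL.length - 1 - k) (by rw [List.length_reverse]; omega)]
  have h1 : topL.length - 1 - k + 1 = topL.length - k := by omega
  rw [h1, List.take_reverse]
  have h2 : topL.length - (topL.length - k) = k := by omega
  rw [h2, pvMaxOfReverse]

lemma pvFoldAPref (xs : List Int) : ∀ (acc : List Int) (s : Int),
    PySem.List.pyGetD acc (-1) 0 = s →
    xs.foldl (fun l v => l ++ [PySem.List.pyGetD l (-1) 0 + v]) acc = acc ++ prefS xs s := by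
  induction xs with
  | nil => intro acc s _; simp [prefS]
  | cons v t ih =>
    intro acc s hs
    simp only [List.foldl_cons, hs, prefS]
    rw [ih (acc ++ [s + v]) (s + v) (PySem.List.pyGetD_neg_one_append_singleton acc (s + v) 0),
      List.append_assoc]
    rfl

lemma pvFoldBPref (xs : List Int) : ∀ (acc : List Int) (s : Int),
    (xs.foldl (fun (p : List Int × Int) v => (p.1 ++ [p.2 + v], p.2 + v)) (acc, s)).1 = acc ++ prefS xs s := by
  induction xs with
  | nil => intro acc s; simp [prefS]
  | cons v t ih =>
    intro acc s
    simp only [List.foldl_cons, prefS]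
    rw [ih (acc ++ [s + v]) (s + v), List.append_assoc]
    rfl

lemma pvFoldBRun (xs : List Int) : ∀ (acc : List Int) (mo : Option Int),
    (xs.foldl (fun (p : List Int × Option Int) t =>
      (p.1 ++ [pyMaxN p.2 t], some (pyMaxN p.2 t))) (acc, mo)).1 = acc ++ runM xs mo := by
  induction xs with
  | nil => intro acc mo; simp [runM]
  | cons v t ih =>
    intro acc mo
    simp only [List.foldl_cons, runM]
    rw [ih, List.append_assoc]
    rfl

lemma pvMapIdxRev (r1 : List Int) (m : ℕ) (hm : m ≤ r1.length) :
    (PySem.List.pyRange 0 (m : Int) 1).map (fun i => PySem.List.pyGetD r1 ((m : Int) - 1 - i) 0)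
      = (r1.take m).reverse := by
  apply List.ext_getElem
  · simp [PySem.List.length_pyRange_one]; omega
  · intro k h1 h2
    have hkm : k < m := by
      simpa [PySem.List.length_pyRange_one] using h1
    rw [List.getElem_map, PySem.List.getElem_pyRange_one, List.getElem_reverse,
      List.getElem_take]
    have hl : (List.take m r1).length = m := by simp; omega
    simp only [zero_add]
    rw [PySem.List.pyGetD_eq_getElem _ 0 (by omega) (by omega)]
    congr 1
    simp [hl]

lemma pvFoldPart (xs : List Int) (d c : Int) :
    (PySem.List.pyRange 0 (xs.length : Int) 1).foldl
      (fun a j => max a (PySem.List.pyGetD xs j 0 - d)) c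
    = if xs = [] then c else max c (maxOf xs - d) := by
  rw [PySem.List.foldl_pyRange_zero_pyGetD' xs 0 (fun a x => max a (x - d)) c]
  cases xs with
  | nil => simp
  | cons v t => rw [pvFoldlMaxSub t v c d, pvMaxOfCons]; simp

lemma pvInnerEq (topL botL : List Int) (m : ℕ) (hm : 1 ≤ m)
    (hT : topL.length = m) (hB : botL.length = m) (i : Int) (h0 : 0 ≤ i) (hi : i < (m : Int)) :
    (PySem.List.pyRange 0 (m : Int) 1).foldl
      (fun a j => max a
        ((if j ≤ i then 0 else PySem.List.pyGetD topL j 0 - PySem.List.pyGetD topL i 0) +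
         (if i ≤ j then 0 else PySem.List.pyGetD botL j 0 - PySem.List.pyGetD botL i 0))) 0
    = refA topL botL (m : Int) i := by
  subst hT
  have hsplit1 : PySem.List.pyRange 0 (topL.length : Int) 1
      = PySem.List.pyRange 0 i 1 ++ PySem.List.pyRange i (topL.length : Int) 1 :=
    PySem.List.pyRange_one_append 0 i _ h0 (le_of_lt hi)
  have hsplit2 : PySem.List.pyRange i (topL.length : Int) 1
      = PySem.List.pyRange i (i + 1) 1 ++ PySem.List.pyRange (i + 1) (topL.length : Int) 1 :=
    PySem.List.pyRange_one_append i (i + 1) _ (by omega) (by omega)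
  rw [hsplit1, hsplit2, List.foldl_append, List.foldl_append,
    PySem.List.pyRange_one_singleton]
  have hlen : (botL.take i.toNat).length = i.toNat := by
    rw [List.length_take]; omega
  -- part 1: j < i, only bottom term
  have hp1 : (PySem.List.pyRange 0 i 1).foldl
      (fun a j => max a
        ((if j ≤ i then 0 else PySem.List.pyGetD topL j 0 - PySem.List.pyGetD topL i 0) +
         (if i ≤ j then 0 else PySem.List.pyGetD botL j 0 - PySem.List.pyGetD botL i 0))) 0
      = (if 0 < i then max 0 (maxOf (botL.take i.toNat) - PySem.List.pyGetD botL i 0) else 0) := by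
    have hcongr : (PySem.List.pyRange 0 i 1).foldl
        (fun a j => max a
          ((if j ≤ i then 0 else PySem.List.pyGetD topL j 0 - PySem.List.pyGetD topL i 0) +
           (if i ≤ j then 0 else PySem.List.pyGetD botL j 0 - PySem.List.pyGetD botL i 0))) 0
        = (PySem.List.pyRange 0 i 1).foldl
          (fun a j => max a (PySem.List.pyGetD (botL.take i.toNat) j 0 - PySem.List.pyGetD botL i 0)) 0 := by
      apply PySem.List.foldl_congr_mem
      intro acc j hj
      rw [PySem.List.mem_pyRange_one] at hj
      have hj1 : j ≤ i := by omega
      have hj2 : ¬ i ≤ j := by omega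
      rw [if_pos hj1, if_neg hj2, zero_add]
      congr 2
      rw [PySem.List.pyGetD_eq_getElem _ 0 (by omega) (by omega),
        PySem.List.pyGetD_eq_getElem _ 0 (by omega) (by rw [hlen]; omega),
        List.getElem_take]
    rw [hcongr]
    set bi := PySem.List.pyGetD botL i 0 with hbi
    set lst := List.take i.toNat botL with hlst
    have hbound : i = (lst.length : Int) := by rw [hlst, hlen]; omega
    rw [hbound, pvFoldPart lst bi 0]
    cases lst with
    | nil => simp
    | cons v t => simp
  rw [hp1]
  -- middle step j = i contributes max a 0
  have hmid : List.foldl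
      (fun a j => max a
        ((if j ≤ i then 0 else PySem.List.pyGetD topL j 0 - PySem.List.pyGetD topL i 0) +
         (if i ≤ j then 0 else PySem.List.pyGetD botL j 0 - PySem.List.pyGetD botL i 0)))
      (if 0 < i then max 0 (maxOf (botL.take i.toNat) - PySem.List.pyGetD botL i 0) else 0) [i]
      = (if 0 < i then max 0 (maxOf (botL.take i.toNat) - PySem.List.pyGetD botL i 0) else 0) := by
    simp only [List.foldl_cons, List.foldl_nil, le_refl, if_pos, add_zero]
    split_ifs with h
    · rw [max_comm, ← max_assoc]; simp
    · simp
  rw [hmid]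
  -- part 3: j > i, only top term
  have hp3 : (PySem.List.pyRange (i + 1) (topL.length : Int) 1).foldl
      (fun a j => max a
        ((if j ≤ i then 0 else PySem.List.pyGetD topL j 0 - PySem.List.pyGetD topL i 0) +
         (if i ≤ j then 0 else PySem.List.pyGetD botL j 0 - PySem.List.pyGetD botL i 0)))
      (if 0 < i then max 0 (maxOf (botL.take i.toNat) - PySem.List.pyGetD botL i 0) else 0)
      = (if i + 1 < (topL.length : Int) then
            max (if 0 < i then max 0 (maxOf (botL.take i.toNat) - PySem.List.pyGetD botL i 0) else 0)
              (maxOf (topL.drop (i.toNat + 1)) - PySem.List.pyGetD topL i 0)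
          else (if 0 < i then max 0 (maxOf (botL.take i.toNat) - PySem.List.pyGetD botL i 0) else 0)) := by
    set c := (if 0 < i then max 0 (maxOf (botL.take i.toNat) - PySem.List.pyGetD botL i 0) else 0) with hc
    have hcongr : (PySem.List.pyRange (i + 1) (topL.length : Int) 1).foldl
        (fun a j => max a
          ((if j ≤ i then 0 else PySem.List.pyGetD topL j 0 - PySem.List.pyGetD topL i 0) +
           (if i ≤ j then 0 else PySem.List.pyGetD botL j 0 - PySem.List.pyGetD botL i 0))) c
        = (PySem.List.pyRange (i + 1) (topL.length : Int) 1).foldl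
          (fun a j => max a (PySem.List.pyGetD topL j 0 - PySem.List.pyGetD topL i 0)) c := by
      apply PySem.List.foldl_congr_mem
      intro acc j hj
      rw [PySem.List.mem_pyRange_one] at hj
      have hj1 : ¬ j ≤ i := by omega
      have hj2 : i ≤ j := by omega
      rw [if_neg hj1, if_pos hj2, add_zero]
    rw [hcongr,
      PySem.List.foldl_pyRange_pyGetD' topL 0
        (fun a t => max a (t - PySem.List.pyGetD topL i 0)) c (a := i + 1) (by omega)]
    have htn : (i + 1).toNat = i.toNat + 1 := by omega
    rw [htn]
    rcases hdrop : topL.drop (i.toNat + 1) with _ | ⟨v, t⟩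
    · have hge : ¬ (i + 1 < (topL.length : Int)) := by
        have := List.drop_eq_nil_iff.mp hdrop
        omega
      rw [if_neg hge, List.foldl_nil]
    · have hlt : i + 1 < (topL.length : Int) := by
        rcases em (topL.length ≤ i.toNat + 1) with h | h
        · rw [List.drop_eq_nil_iff.mpr (by omega)] at hdrop; simp at hdrop
        · omega
      rw [if_pos hlt, pvFoldlMaxSub t v c _, pvMaxOfCons]
  rw [hp3]
  -- assemble the four cases
  unfold refA
  split_ifs <;> first | rfl | exact pvMaxSwap _ _

lemma pvMinNEq (o : Option Int) (a : Int) : pyMinN o a = pyInfMin o a := by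
  cases o <;> rfl

lemma pvBLoop (topL botL suf : List Int) (m : ℕ) (hm : 1 ≤ m)
    (hT : topL.length = m) (hB : botL.length = m)
    (hsuf : ∀ k : ℕ, k < m → suf.getD k 0 = maxOf (topL.drop k)) :
    ∀ k : ℕ, k ≤ m →
    (PySem.List.pyRange 0 (k : Int) 1).foldl
      (fun (st : Option Int × Option Int) i =>
        (pyMinN st.1
          (pyRelax (if i + 1 < (m : Int) then
              max 0 (PySem.List.pyGetD suf (i + 1) 0 - PySem.List.pyGetD topL i 0) else 0)
            st.2 (PySem.List.pyGetD botL i 0)),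
          some (pyMaxN st.2 (PySem.List.pyGetD botL i 0)))) (none, none)
    = ((PySem.List.pyRange 0 (k : Int) 1).foldl
        (fun ans i => pyInfMin ans (refA topL botL (m : Int) i)) none,
        if k = 0 then none else some (maxOf (botL.take k))) := by
  intro k
  induction k with
  | zero =>
    intro _
    rw [PySem.List.pyRange_one_eq_nil (by omega)]
    simp
  | succ k ihk =>
    intro hk1
    have hk : k ≤ m := by omega
    have hkm : k < m := by omega
    have hcast : ((k + 1 : ℕ) : Int) = (k : Int) + 1 := by push_cast; ring
    rw [hcast, PySem.List.pyRange_one_succ_right (by omega), List.foldl_append,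
      List.foldl_append, ihk hk]
    simp only [List.foldl_cons, List.foldl_nil]
    -- the per-step inner value equals refA at i = k
    have hsufk : ((k : Int) + 1 < (m : Int) →
        PySem.List.pyGetD suf ((k : Int) + 1) 0 = maxOf (topL.drop (k + 1))) := by
      intro hlt
      have : ((k : Int) + 1) = ((k + 1 : ℕ) : Int) := by push_cast; ring
      rw [this, PySem.List.pyGetD_natCast, List.getD_eq_getElem?_getD,
        ← List.getD_eq_getElem?_getD, hsuf (k + 1) (by omega)]
    have haval : (if (k : Int) + 1 < (m : Int) then
          max 0 (PySem.List.pyGetD suf ((k : Int) + 1) 0 - PySem.List.pyGetD topL (k : Int) 0) else 0)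
        = (if (k : Int) + 1 < (m : Int) then
          max 0 (maxOf (topL.drop (k + 1)) - PySem.List.pyGetD topL (k : Int) 0) else 0) := by
      rcases em ((k : Int) + 1 < (m : Int)) with h | h
      · rw [if_pos h, if_pos h, hsufk h]
      · rw [if_neg h, if_neg h]
    have hgetb : PySem.List.pyGetD botL (k : Int) 0 = botL[k]'(by omega) := by
      rw [PySem.List.pyGetD_eq_getElem _ 0 (by omega) (by omega)]
      congr 1
    rcases Nat.eq_zero_or_pos k with hk0 | hk0
    · subst hk0
      norm_num at haval hgetb ⊢
      refine ⟨?_, ?_⟩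
      · rw [pvMinNEq]
        congr 1
        rw [haval]
        simp [refA, pyRelax]
      · cases botL with
        | nil => simp at hB; omega
        | cons b rest => simp [maxOf, pyMaxN, PySem.List.pyGetD_zero]
    · have hkne : ¬ (k = 0) := by omega
      have hsne : ¬ (k + 1 = 0) := by omega
      simp only [if_neg hkne, if_neg hsne]
      rw [Prod.mk.injEq]
      refine ⟨?_, ?_⟩
      · rw [pvMinNEq]
        congr 1
        rw [haval]
        unfold refA
        rw [if_pos (by omega : (0 : Int) < (k : Int))]
        simp only [Int.toNat_natCast, pyRelax]
      · have htail : (botL.take k) ≠ [] := by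
          have : (botL.take k).length = k := by rw [List.length_take]; omega
          intro hcon; rw [hcon] at this; simp at this; omega
        have hconc := List.take_concat_get (l := botL) (i := k) (by omega)
        rw [hgetb, ← hconc, List.concat_eq_append, pvMaxOfAppend _ _ htail]
        simp [pyMaxN]

-- ===== VERDICT (by name: the statement is the Claim_ definition above) =====
theorem gridGame_tle_spec : Claim_equal_gridGame_tle := by
  intro grid _dom hpre
  unfold Spec_gridGame_tle
  obtain ⟨hg2, hr0len, hler⟩ := hpre
  rcases grid with _ | ⟨r0, grid'⟩
  · simp at hg2
  rcases grid' with _ | ⟨r1, rest⟩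
  · simp at hg2
  simp only [List.getD_cons_zero, List.getD_cons_succ] at hr0len hler
  have hg1 : PySem.List.pyGetD (r0 :: r1 :: rest) 1 ([] : List Int) = r1 := by
    rw [show (1 : Int) = ((1 : ℕ) : Int) from rfl, PySem.List.pyGetD_natCast]
    rfl
  have hTlen : (prefS r0 0).length = r0.length := pvPrefSLength r0 0
  have hBlen : ((prefS ((r1.take r0.length).reverse) 0).reverse).length = r0.length := by
    rw [List.length_reverse, pvPrefSLength, List.length_reverse, List.length_take]
    omega
  have hA : gridGame_tle (r0 :: r1 :: rest)
      = ((PySem.List.pyRange 0 (r0.length : Int) 1).foldl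
          (fun ans i => pyInfMin ans
            (refA (prefS r0 0) ((prefS ((r1.take r0.length).reverse) 0).reverse) (r0.length : Int) i))
          none).getD 0 := by
    simp only [gridGame_tle, PySem.List.pyGetD_zero_cons, hg1]
    rw [PySem.List.foldl_prod_mk
      (f := fun l i => l ++ [PySem.List.pyGetD l (-1) 0 + PySem.List.pyGetD r0 i 0])
      (g := fun l i => l ++ [PySem.List.pyGetD l (-1) 0 + PySem.List.pyGetD r1 ((r0.length : Int) - 1 - i) 0])]
    dsimp only
    rw [PySem.List.foldl_pyRange_zero_pyGetD' r0 0 (fun l v => l ++ [PySem.List.pyGetD l (-1) 0 + v]) [0]]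
    rw [pvFoldAPref r0 [0] 0 (by decide)]
    rw [← List.foldl_map (f := fun i => PySem.List.pyGetD r1 ((r0.length : Int) - 1 - i) 0)
      (g := fun l v => l ++ [PySem.List.pyGetD l (-1) 0 + v])]
    rw [pvMapIdxRev r1 r0.length hler]
    rw [pvFoldAPref ((r1.take r0.length).reverse) [0] 0 (by decide)]
    simp only [List.cons_append, List.nil_append, PySem.List.slice_from_one, List.tail_cons]
    refine congrArg (fun o => Option.getD o 0) ?_
    apply PySem.List.foldl_congr_mem
    intro acc i hi
    rw [PySem.List.mem_pyRange_one] at hi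
    have hInner := pvInnerEq (prefS r0 0) ((prefS ((r1.take r0.length).reverse) 0).reverse)
      r0.length hr0len hTlen hBlen i hi.1 hi.2
    cases acc with
    | none => simp only [pyInfMin]; rw [hInner]
    | some v => simp only [pyInfMin]; rw [hInner]
  have hB : gridGame_tle_alt (r0 :: r1 :: rest)
      = ((PySem.List.pyRange 0 (r0.length : Int) 1).foldl
          (fun ans i => pyInfMin ans
            (refA (prefS r0 0) ((prefS ((r1.take r0.length).reverse) 0).reverse) (r0.length : Int) i))
          none).getD 0 := by
    simp only [gridGame_tle_alt, PySem.List.pyGetD_zero_cons, hg1]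
    rw [pvFoldBPref r0 [] 0]
    rw [PySem.List.slice_to r1 (by positivity)]
    simp only [Int.toNat_natCast, List.nil_append]
    rw [pvFoldBPref ((r1.take r0.length).reverse) [] 0]
    simp only [List.nil_append]
    rw [pvFoldBRun ((prefS r0 0).reverse) [] none]
    simp only [List.nil_append]
    have hsufprop : ∀ k : ℕ, k < r0.length →
        ((runM ((prefS r0 0).reverse) none).reverse).getD k 0 = maxOf ((prefS r0 0).drop k) :=
      fun k hk => pvSufGetD (prefS r0 0) k (by rw [hTlen]; omega)
    rw [pvBLoop (prefS r0 0) ((prefS ((r1.take r0.length).reverse) 0).reverse)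
      ((runM ((prefS r0 0).reverse) none).reverse) r0.length hr0len hTlen hBlen hsufprop
      r0.length le_rfl]
  rw [hA, hB]
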